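-- pv_equiv track=rewrite | github.com/RSstrobe/parser_spbstu | lib/prepare_list_for_dataframe.py | prepare_list_for_dataframe
-- ===== SOURCE A (Python) =====
-- def prepare_list_for_dataframe(list_after_clean):
--     """
--     Функция для приведения списка к необходимому виду.
--     :param list_after_clean: list after data_cleaning() function
--     :return: list ready for convert to dataframe
--     """
--     final_list = []
--     for string in list_after_clean:
--         if 'DATES' in string and len(string) == 2:
--             final_list.append([string[1]] + [None] * 15)
--         if any(element in string for element in ['COMPDAT', 'COMPDATL']):
--             if 'DATES' in string:
--                 indices = [i for i, x in enumerate(string) if x in ["COMPDAT", "COMPDATL"]]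
--                 for ind in indices:
--                     i = 1
--                     while ind + i not in indices and (ind + i) <= (len(string) - 1):
--                         l = string[ind + i].split()
--                         if string[ind] == "COMPDAT":
--                             l.insert(0, string[1])
--                             l.insert(2, None)
--                             final_list.append(l)
--                         elif string[ind] == "COMPDATL":
--                             l.insert(0, string[1])
--                             final_list.append(l)
--                         i += 1
--             if 'DATES' not in string:
--                 indices = [i for i, x in enumerate(string) if x in ["COMPDAT", "COMPDATL"]]
--                 for ind in indices:
--                     i = 1
--                     while ind + i not in indices and (ind + i) <= (len(string) - 1):
--                         l = string[ind + i].split()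
--                         if string[ind] == "COMPDAT":
--                             l.insert(0, None)
--                             l.insert(2, None)
--                             final_list.append(l)
--                         elif string[ind] == "COMPDATL":
--                             l.insert(0, None)
--                             final_list.append(l)
--                         i += 1
--     return final_list
-- ===== SOURCE B (Python) =====
-- def prepare_list_for_dataframe(list_after_clean):
--     """Single forward state-machine pass; same rows, same order."""
--     final_list = []
--     for string in list_after_clean:
--         has_dates = 'DATES' in string
--         if has_dates and len(string) == 2:
--             final_list.append([string[1]] + [None] * 15)
--         marker = None
--         for element in string:
--             if element in ('COMPDAT', 'COMPDATL'):
--                 marker = element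
--             elif marker is not None:
--                 row = element.split()
--                 row.insert(0, string[1] if has_dates else None)
--                 if marker == 'COMPDAT':
--                     row.insert(2, None)
--                 final_list.append(row)
--     return final_list
-- ===== Notes on version B (the rewrite author's own statement) =====
-- stated objective: simpler
-- what changed: B replaces A's duplicated branch bodies, marker-index table and per-marker bounded while-scan over positions by a single forward state-machine pass over each row that tracks the currently active marker and emits one output row per data token.
import Mathlib
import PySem

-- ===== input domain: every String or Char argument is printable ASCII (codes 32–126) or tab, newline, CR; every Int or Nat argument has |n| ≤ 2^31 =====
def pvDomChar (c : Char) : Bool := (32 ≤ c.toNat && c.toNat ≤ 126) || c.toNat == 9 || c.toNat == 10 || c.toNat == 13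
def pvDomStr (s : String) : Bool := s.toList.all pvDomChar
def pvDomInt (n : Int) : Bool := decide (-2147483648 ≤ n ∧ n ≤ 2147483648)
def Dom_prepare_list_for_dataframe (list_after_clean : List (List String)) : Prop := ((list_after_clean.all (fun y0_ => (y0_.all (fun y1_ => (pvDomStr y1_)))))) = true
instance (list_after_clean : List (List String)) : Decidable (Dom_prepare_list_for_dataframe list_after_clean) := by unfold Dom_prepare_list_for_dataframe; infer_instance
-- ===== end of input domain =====

-- B replaces A's marker-index table and bounded inner while-scan by a single
-- forward state-machine pass per row (objective: simpler; same exact rows and order).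

-- ===== PORT A =====
-- indices = [i for i, x in enumerate(string) if x in ["COMPDAT", "COMPDATL"]]
def pvIndicesA (string : List String) : List Int :=
  ((PySem.List.enumerate string).filter
      (fun p => p.2 == "COMPDAT" || p.2 == "COMPDATL")).map Prod.fst

-- the inner 'i = 1; while ind + i not in indices and (ind+i) <= len(string)-1: …; i += 1'
-- loop of A (both copies, which differ only in the value inserted at position 0: 'pref'),
-- threading the final_list accumulator; fuel = len(string) always suffices (i starts at 1).
def pvWhileA (string : List String) (indices : List Int) (pref : Option String) (ind : Int) :
    Nat → Int → List (List (Option String)) → List (List (Option String))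
  | 0, _, acc => acc
  | fuel+1, i, acc =>
    if (ind + i) ∉ indices ∧ ind + i ≤ (string.length : Int) - 1 then
      let l : List (Option String) :=
        (PySem.Str.split₀ ((PySem.List.pyGet? string (ind + i)).getD "")).map some
      let acc' :=
        if (PySem.List.pyGet? string ind).getD "" = "COMPDAT" then
          acc ++ [PySem.List.insert (PySem.List.insert l 0 pref) 2 none]
        else if (PySem.List.pyGet? string ind).getD "" = "COMPDATL" then
          acc ++ [PySem.List.insert l 0 pref]
        else acc
      pvWhileA string indices pref ind fuel (i + 1) acc'
    else acc

def prepare_list_for_dataframe (list_after_clean : List (List String)) : List (List (Option String)) :=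
  list_after_clean.foldl (fun final_list string =>
    let fl1 :=
      if string.contains "DATES" ∧ string.length = 2 then
        final_list ++ [some ((PySem.List.pyGet? string 1).getD "") :: List.replicate 15 none]
      else final_list
    if ["COMPDAT", "COMPDATL"].any (fun element => string.contains element) then
      let fl2 :=
        if string.contains "DATES" then
          let indices := pvIndicesA string
          indices.foldl (fun fl ind =>
            pvWhileA string indices (some ((PySem.List.pyGet? string 1).getD "")) ind
              string.length 1 fl) fl1
        else fl1
      if ¬ string.contains "DATES" then
        let indices := pvIndicesA string
        indices.foldl (fun fl ind =>
          pvWhileA string indices none ind string.length 1 fl) fl2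
      else fl2
    else fl1) []

-- ===== PORT B =====
def prepare_list_for_dataframe_alt (list_after_clean : List (List String)) : List (List (Option String)) :=
  list_after_clean.foldl (fun final_list string =>
    let hasDates := string.contains "DATES"
    let fl1 :=
      if hasDates ∧ string.length = 2 then
        final_list ++ [some ((PySem.List.pyGet? string 1).getD "") :: List.replicate 15 none]
      else final_list
    (string.foldl (fun (st : List (List (Option String)) × Option String) element =>
        if element = "COMPDAT" ∨ element = "COMPDATL" then (st.1, some element)
        else
          match st.2 with
          | none => st
          | some m =>
            let row := (PySem.Str.split₀ element).map some
            let row := PySem.List.insert row 0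
              (if hasDates then some ((PySem.List.pyGet? string 1).getD "") else none)
            let row := if m = "COMPDAT" then PySem.List.insert row 2 none else row
            (st.1 ++ [row], st.2)) (fl1, none)).1) []

-- ===== PRECONDITION & SPEC =====
def Spec_prepare_list_for_dataframe (list_after_clean : List (List String)) (out : List (List (Option String))) : Prop := out = prepare_list_for_dataframe_alt list_after_clean
instance (list_after_clean : List (List String)) (out : List (List (Option String))) : Decidable (Spec_prepare_list_for_dataframe list_after_clean out) := by unfold Spec_prepare_list_for_dataframe; infer_instance

-- ===== CLAIM (what is proved, stated in full; the proofs are below) =====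
def Claim_equal_prepare_list_for_dataframe : Prop := ∀ (list_after_clean : List (List String)), Dom_prepare_list_for_dataframe list_after_clean → Spec_prepare_list_for_dataframe list_after_clean (prepare_list_for_dataframe list_after_clean)

-- ===== LEMMAS AND PROOFS =====

def pvIsMarker (x : String) : Bool := x == "COMPDAT" || x == "COMPDATL"

-- the row built for a data token t seen while marker m is active, with prefix value pref
def pvRow (pref : Option String) (m : String) (t : String) : List (Option String) :=
  let l := PySem.List.insert ((PySem.Str.split₀ t).map some) 0 pref
  if m = "COMPDAT" then PySem.List.insert l 2 none else l

-- B's inner state machine, as a pure recursion (state = active marker)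
def pvRunB (pref : Option String) : Option String → List String → List (List (Option String))
  | _, [] => []
  | m, x :: rest =>
    if pvIsMarker x then pvRunB pref (some x) rest
    else
      match m with
      | some mk => pvRow pref mk x :: pvRunB pref (some mk) rest
      | none => pvRunB pref none rest

theorem pvMarker_iff (x : String) : pvIsMarker x = true ↔ (x = "COMPDAT" ∨ x = "COMPDATL") := by
  simp [pvIsMarker]

theorem pvWhileA_acc (string : List String) (indices : List Int) (pref : Option String)
    (ind : Int) (fuel : Nat) : ∀ (i : Int) (acc : List (List (Option String))),
    pvWhileA string indices pref ind fuel i acc = acc ++ pvWhileA string indices pref ind fuel i [] := by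
  induction fuel with
  | zero => intro i acc; simp [pvWhileA]
  | succ n ih =>
    intro i acc
    simp only [pvWhileA]
    split
    · rw [ih (i + 1), ih (i + 1)
        (if (PySem.List.pyGet? string ind).getD "" = "COMPDAT" then
          [] ++ [PySem.List.insert (PySem.List.insert
            ((PySem.Str.split₀ ((PySem.List.pyGet? string (ind + i)).getD "")).map some) 0 pref) 2 none]
        else if (PySem.List.pyGet? string ind).getD "" = "COMPDATL" then
          [] ++ [PySem.List.insert
            ((PySem.Str.split₀ ((PySem.List.pyGet? string (ind + i)).getD "")).map some) 0 pref]
        else [])]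
      have hacc : (if (PySem.List.pyGet? string ind).getD "" = "COMPDAT" then
          acc ++ [PySem.List.insert (PySem.List.insert
            ((PySem.Str.split₀ ((PySem.List.pyGet? string (ind + i)).getD "")).map some) 0 pref) 2 none]
        else if (PySem.List.pyGet? string ind).getD "" = "COMPDATL" then
          acc ++ [PySem.List.insert
            ((PySem.Str.split₀ ((PySem.List.pyGet? string (ind + i)).getD "")).map some) 0 pref]
        else acc) = acc ++ (if (PySem.List.pyGet? string ind).getD "" = "COMPDAT" then
          [] ++ [PySem.List.insert (PySem.List.insert
            ((PySem.Str.split₀ ((PySem.List.pyGet? string (ind + i)).getD "")).map some) 0 pref) 2 none]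
        else if (PySem.List.pyGet? string ind).getD "" = "COMPDATL" then
          [] ++ [PySem.List.insert
            ((PySem.Str.split₀ ((PySem.List.pyGet? string (ind + i)).getD "")).map some) 0 pref]
        else []) := by
        split_ifs <;> simp
      rw [hacc, List.append_assoc]
    · simp

theorem pvEnumShift (s : List String) : ∀ (k : Int),
    PySem.List.enumerate s (k + 1) = (PySem.List.enumerate s k).map (fun p => (p.1 + 1, p.2)) := by
  induction s with
  | nil => intro k; simp [PySem.List.enumerate_nil]
  | cons x rest ih =>
    intro k
    rw [PySem.List.enumerate_cons, PySem.List.enumerate_cons, List.map_cons, ih (k + 1)]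

theorem pvInd_cons (x : String) (rest : List String) :
    pvIndicesA (x :: rest) =
      (if pvIsMarker x then [(0 : Int)] else []) ++ (pvIndicesA rest).map (· + 1) := by
  unfold pvIndicesA
  rw [PySem.List.enumerate_cons x rest 0, pvEnumShift rest 0]
  rw [List.filter_cons, List.filter_map, List.map_map]
  by_cases hx : pvIsMarker x
  · have hx' : (x == "COMPDAT" || x == "COMPDATL") = true := hx
    simp only [hx', if_pos, List.map_cons]
    simp [List.map_map, Function.comp_def, pvIsMarker, hx']
  · have hx' : (x == "COMPDAT" || x == "COMPDATL") = false := by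
      simpa [pvIsMarker] using hx
    simp only [hx', Bool.false_eq_true, if_false]
    simp [List.map_map, Function.comp_def, pvIsMarker, hx']

theorem pvInd_nonneg (s : List String) : ∀ j ∈ pvIndicesA s, 0 ≤ j := by
  induction s with
  | nil => intro j hj; simp [pvIndicesA, PySem.List.enumerate_nil] at hj
  | cons x rest ih =>
    intro j hj
    rw [pvInd_cons] at hj
    rcases List.mem_append.1 hj with h | h
    · split_ifs at h <;> simp at h; omega
    · rcases List.mem_map.1 h with ⟨a, ha, rfl⟩
      have := ih a ha; omega

theorem pvGetD_cons_succ (x : String) (rest : List String) (b : Nat) (hb : 1 ≤ b) :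
    (x :: rest).getD b "" = rest.getD (b - 1) "" := by
  cases b with
  | zero => omega
  | succ b' => simp [List.getD]

theorem pvInd_mem (s : List String) : ∀ (k : Nat),
    ((k : Int) ∈ pvIndicesA s) ↔ (k < s.length ∧ pvIsMarker (s.getD k "") = true) := by
  induction s with
  | nil => intro k; simp [pvIndicesA, PySem.List.enumerate_nil]
  | cons x rest ih =>
    intro k
    rw [pvInd_cons, List.mem_append]
    cases k with
    | zero =>
      constructor
      · rintro (h | h)
        · split_ifs at h with hx
          · exact ⟨by simp, hx⟩
          · simp at h
        · rcases List.mem_map.1 h with ⟨a, ha, hak⟩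
          have := pvInd_nonneg rest a ha; omega
      · rintro ⟨-, hx⟩
        left
        have hx' : pvIsMarker x = true := by simpa [List.getD] using hx
        simp [hx']
    | succ k' =>
      constructor
      · rintro (h | h)
        · split_ifs at h <;> simp at h; omega
        · rcases List.mem_map.1 h with ⟨a, ha, hak⟩
          have ha' : a = (k' : Int) := by omega
          subst ha'
          have := (ih k').1 ha
          simp only [List.length_cons, List.getD, List.getElem?_cons_succ]
          exact ⟨by omega, this.2⟩
      · rintro ⟨hlt, hx⟩
        simp only [List.length_cons] at hlt
        right
        refine List.mem_map.2 ⟨(k' : Int), (ih k').2 ⟨by omega, ?_⟩, by push_cast; ring⟩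
        simpa [List.getD] using hx

theorem pvInd_elems (s : List String) (j : Int) (hj : j ∈ pvIndicesA s) :
    ∃ k : Nat, j = (k : Int) ∧ k < s.length ∧ pvIsMarker (s.getD k "") = true := by
  have h0 := pvInd_nonneg s j hj
  refine ⟨j.toNat, by omega, ?_⟩
  have : ((j.toNat : Int)) ∈ pvIndicesA s := by rwa [Int.toNat_of_nonneg h0]
  exact (pvInd_mem s j.toNat).1 this

theorem pvWhileA_fuel (string : List String) (indices : List Int) (pref : Option String)
    (ind : Int) (f1 : Nat) :
    ∀ (f2 : Nat) (i : Int), (string.length : Int) - (ind + i) ≤ f1 →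
      (string.length : Int) - (ind + i) ≤ f2 →
      pvWhileA string indices pref ind f1 i [] = pvWhileA string indices pref ind f2 i [] := by
  induction f1 with
  | zero =>
    intro f2 i h1 h2
    cases f2 with
    | zero => rfl
    | succ m =>
      simp only [pvWhileA]
      rw [if_neg]
      rintro ⟨-, hle⟩; omega
  | succ n ih =>
    intro f2 i h1 h2
    cases f2 with
    | zero =>
      simp only [pvWhileA]
      rw [if_neg]
      rintro ⟨-, hle⟩; omega
    | succ m =>
      simp only [pvWhileA]
      split
      · rw [pvWhileA_acc string indices pref ind n (i + 1),
          pvWhileA_acc string indices pref ind m (i + 1)]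
        congr 1
        exact ih m (i + 1) (by omega) (by omega)
      · rfl

theorem pvWhileA_shift (x : String) (rest : List String) (pref : Option String) (a : Nat)
    (fuel : Nat) : ∀ (b : Nat), 1 ≤ b →
    pvWhileA (x :: rest) (pvIndicesA (x :: rest)) pref ((a : Int) + 1) fuel (b : Int) [] =
      pvWhileA rest (pvIndicesA rest) pref (a : Int) fuel (b : Int) [] := by
  induction fuel with
  | zero => intro b hb; rfl
  | succ n ih =>
    intro b hb
    have hmem : (((a : Int) + 1 + (b : Int)) ∈ pvIndicesA (x :: rest)) ↔
        (((a : Int) + (b : Int)) ∈ pvIndicesA rest) := by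
      rw [pvInd_cons, List.mem_append]
      constructor
      · rintro (h | h)
        · split_ifs at h <;> simp at h; omega
        · rcases List.mem_map.1 h with ⟨j, hj, hjk⟩
          have : j = (a : Int) + (b : Int) := by omega
          subst this; exact hj
      · intro h
        right
        exact List.mem_map.2 ⟨(a : Int) + (b : Int), h, by ring⟩
    have hcond : ((((a : Int) + 1 + (b : Int)) ∉ pvIndicesA (x :: rest)) ∧
          (a : Int) + 1 + (b : Int) ≤ ((x :: rest).length : Int) - 1) ↔
        ((((a : Int) + (b : Int)) ∉ pvIndicesA rest) ∧
          (a : Int) + (b : Int) ≤ (rest.length : Int) - 1) := by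
      rw [hmem]
      simp only [List.length_cons]
      constructor <;> rintro ⟨h1, h2⟩ <;> exact ⟨h1, by push_cast at h2 ⊢; omega⟩
    simp only [pvWhileA]
    by_cases hc : (((a : Int) + (b : Int)) ∉ pvIndicesA rest) ∧
        (a : Int) + (b : Int) ≤ (rest.length : Int) - 1
    · rw [if_pos (hcond.2 hc), if_pos hc]
      have hget1 : PySem.List.pyGet? (x :: rest) ((a : Int) + 1 + (b : Int)) =
          PySem.List.pyGet? rest ((a : Int) + (b : Int)) := by
        rw [show (a : Int) + 1 + (b : Int) = ((a + b + 1 : Nat) : Int) by push_cast; ring,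
          show (a : Int) + (b : Int) = ((a + b : Nat) : Int) by push_cast; ring,
          PySem.List.pyGet?_natCast, PySem.List.pyGet?_natCast, List.getElem?_cons_succ]
      have hget2 : PySem.List.pyGet? (x :: rest) ((a : Int) + 1) =
          PySem.List.pyGet? rest (a : Int) := by
        rw [show (a : Int) + 1 = ((a + 1 : Nat) : Int) by push_cast; ring,
          PySem.List.pyGet?_natCast, PySem.List.pyGet?_natCast, List.getElem?_cons_succ]
      rw [hget1, hget2]
      rw [pvWhileA_acc (x :: rest) (pvIndicesA (x :: rest)) pref ((a : Int) + 1) n ((b : Int) + 1),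
        pvWhileA_acc rest (pvIndicesA rest) pref (a : Int) n ((b : Int) + 1)]
      congr 1
      have h := ih (b + 1) (by omega)
      rw [show ((b : Int) + 1) = ((b + 1 : Nat) : Int) by push_cast; ring]
      exact h
    · rw [if_neg (fun h => hc (hcond.1 h)), if_neg hc]

theorem pvWhileA_head (x : String) (rest : List String) (pref : Option String)
    (hx : pvIsMarker x = true) (fuel : Nat) : ∀ (b : Nat), 1 ≤ b → rest.length + 1 - b ≤ fuel →
    pvWhileA (x :: rest) (pvIndicesA (x :: rest)) pref 0 fuel (b : Int) [] =
      ((rest.drop (b - 1)).takeWhile (fun t => !pvIsMarker t)).map (pvRow pref x) := by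
  induction fuel with
  | zero =>
    intro b hb hf
    rw [List.drop_eq_nil_of_le (by omega)]
    rfl
  | succ n ih =>
    intro b hb hf
    simp only [pvWhileA]
    rcases Nat.lt_or_ge rest.length b with hlen | hlen
    · have hc : ¬ (((0 : Int) + (b : Int) ∉ pvIndicesA (x :: rest)) ∧
          (0 : Int) + (b : Int) ≤ ((x :: rest).length : Int) - 1) := by
        rintro ⟨-, hle⟩
        simp only [List.length_cons] at hle; push_cast at hle; omega
      rw [if_neg hc, List.drop_eq_nil_of_le (by omega)]
      rfl
    · have hb1 : b - 1 < rest.length := by omega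
      have hgetDc : (x :: rest).getD b "" = rest[b - 1] := by
        rw [pvGetD_cons_succ x rest b hb]
        simp [List.getD, List.getElem?_eq_getElem hb1]
      have hmem : ((0 : Int) + (b : Int) ∈ pvIndicesA (x :: rest)) ↔
          pvIsMarker rest[b - 1] = true := by
        rw [show (0 : Int) + (b : Int) = ((b : Nat) : Int) by ring, pvInd_mem]
        constructor
        · rintro ⟨-, h⟩; rwa [hgetDc] at h
        · intro h
          exact ⟨by simp only [List.length_cons]; omega, by rw [hgetDc]; exact h⟩
      rw [List.drop_eq_getElem_cons hb1, show b - 1 + 1 = b by omega, List.takeWhile_cons]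
      by_cases hm : pvIsMarker rest[b - 1] = true
      · have hc : ¬ (((0 : Int) + (b : Int) ∉ pvIndicesA (x :: rest)) ∧
            (0 : Int) + (b : Int) ≤ ((x :: rest).length : Int) - 1) := by
          rintro ⟨hnot, -⟩
          exact hnot (hmem.2 hm)
        rw [if_neg hc, if_neg (by simp [hm])]
        simp
      · have hc : (((0 : Int) + (b : Int) ∉ pvIndicesA (x :: rest)) ∧
            (0 : Int) + (b : Int) ≤ ((x :: rest).length : Int) - 1) := by
          refine ⟨fun h => hm (hmem.1 h), ?_⟩
          simp only [List.length_cons]; push_cast; omega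
        rw [if_pos hc]
        have hget0 : (PySem.List.pyGet? (x :: rest) 0).getD "" = x := by
          rw [show (0 : Int) = ((0 : Nat) : Int) by norm_num, PySem.List.pyGet?_natCast]
          rfl
        have hgetb : (PySem.List.pyGet? (x :: rest) (0 + (b : Int))).getD "" = rest[b - 1] := by
          rw [show (0 : Int) + (b : Int) = ((b - 1 + 1 : Nat) : Int) by push_cast; omega,
            PySem.List.pyGet?_natCast, List.getElem?_cons_succ,
            List.getElem?_eq_getElem hb1]
          rfl
        rw [hget0, hgetb, if_pos (by simp [hm] : (!pvIsMarker rest[b - 1]) = true)]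
        have hrow : (if x = "COMPDAT" then
              ([] : List (List (Option String))) ++ [PySem.List.insert (PySem.List.insert
                ((PySem.Str.split₀ rest[b - 1]).map some) 0 pref) 2 none]
            else if x = "COMPDATL" then
              [] ++ [PySem.List.insert ((PySem.Str.split₀ rest[b - 1]).map some) 0 pref]
            else []) = [pvRow pref x rest[b - 1]] := by
          rcases (pvMarker_iff x).1 hx with h | h <;> subst h <;> simp [pvRow]
        rw [hrow, pvWhileA_acc (x :: rest) (pvIndicesA (x :: rest)) pref 0 n ((b : Int) + 1)]
        rw [show ((b : Int) + 1) = ((b + 1 : Nat) : Int) by push_cast; ring]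
        rw [ih (b + 1) (by omega) (by omega)]
        simp

theorem pvRunB_some (pref : Option String) : ∀ (s : List String) (m : String),
    pvRunB pref (some m) s =
      (s.takeWhile (fun t => !pvIsMarker t)).map (pvRow pref m) ++ pvRunB pref none s := by
  intro s
  induction s with
  | nil => intro m; rfl
  | cons x rest ih =>
    intro m
    by_cases hx : pvIsMarker x = true
    · simp [pvRunB, hx]
    · simp [pvRunB, hx, ih m]

theorem pvMain : ∀ (s : List String) (pref : Option String),
    (pvIndicesA s).flatMap (fun ind => pvWhileA s (pvIndicesA s) pref ind s.length 1 []) =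
      pvRunB pref none s := by
  intro s
  induction s with
  | nil => intro pref; rfl
  | cons x rest ih =>
    intro pref
    have hsrc := congrArg (fun L => List.flatMap (fun ind =>
      pvWhileA (x :: rest) (pvIndicesA (x :: rest)) pref ind (x :: rest).length 1 []) L)
      (pvInd_cons x rest)
    simp only at hsrc
    rw [hsrc, List.flatMap_append, List.flatMap_map]
    have htail : (List.flatMap (fun a =>
        pvWhileA (x :: rest) (pvIndicesA (x :: rest)) pref (a + 1) (x :: rest).length 1 [])
        (pvIndicesA rest)) = pvRunB pref none rest := by
      rw [← ih pref]
      apply List.flatMap_congr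
      intro j hj
      rcases pvInd_elems rest j hj with ⟨k, rfl, hk, -⟩
      have h1 := pvWhileA_shift x rest pref k (rest.length + 1) 1 le_rfl
      have h2 := pvWhileA_fuel rest (pvIndicesA rest) pref (k : Int) (rest.length + 1)
        rest.length (((1 : Nat)) : Int) (by push_cast; omega) (by push_cast; omega)
      have h3 := h1.trans h2
      simpa using h3
    rw [htail]
    by_cases hx : pvIsMarker x = true
    · rw [if_pos hx]
      simp only [List.flatMap_cons, List.flatMap_nil, List.append_nil]
      have h0 := pvWhileA_head x rest pref hx (rest.length + 1) 1 le_rfl (by omega)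
      simp only [Nat.cast_one, Nat.sub_self, List.drop_zero] at h0
      rw [show (x :: rest).length = rest.length + 1 from rfl, h0]
      rw [show pvRunB pref none (x :: rest) = pvRunB pref (some x) rest by simp [pvRunB, hx]]
      rw [pvRunB_some]
    · rw [if_neg hx]
      simp only [List.flatMap_nil, List.nil_append]
      rw [show pvRunB pref none (x :: rest) = pvRunB pref none rest by simp [pvRunB, hx]]

theorem pvRunB_no_marker (pref : Option String) : ∀ (s : List String),
    ¬ s.contains "COMPDAT" = true → ¬ s.contains "COMPDATL" = true →
    pvRunB pref none s = [] := by
  intro s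
  induction s with
  | nil => intro _ _; rfl
  | cons x rest ih =>
    intro h1 h2
    simp only [List.contains_cons, Bool.or_eq_true, beq_iff_eq] at h1 h2
    push Not at h1 h2
    have hx : ¬ pvIsMarker x = true := by
      rw [pvMarker_iff]
      rintro (rfl | rfl)
      · exact h1.1 rfl
      · exact h2.1 rfl
    simp only [pvRunB, hx]
    exact ih (by simpa using h1.2) (by simpa using h2.2)

theorem pvFoldWhile (s : List String) (indices : List Int) (pref : Option String)
    (fuel : Nat) (idx : List Int) (acc : List (List (Option String))) :
    idx.foldl (fun fl ind => pvWhileA s indices pref ind fuel 1 fl) acc =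
      acc ++ idx.flatMap (fun ind => pvWhileA s indices pref ind fuel 1 []) := by
  have h : (fun (fl : List (List (Option String))) (ind : Int) =>
      pvWhileA s indices pref ind fuel 1 fl) =
      fun fl ind => fl ++ pvWhileA s indices pref ind fuel 1 [] := by
    funext fl ind
    exact pvWhileA_acc s indices pref ind fuel 1 fl
  rw [h, PySem.List.foldl_append_eq_flatMap]

theorem pvFoldB (pref : Option String)
    (step : List (List (Option String)) × Option String → String → List (List (Option String)) × Option String)
    (hstep : step = fun st element =>
        if element = "COMPDAT" ∨ element = "COMPDATL" then (st.1, some element)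
        else
          match st.2 with
          | none => st
          | some m =>
            let row := (PySem.Str.split₀ element).map some
            let row := PySem.List.insert row 0 pref
            let row := if m = "COMPDAT" then PySem.List.insert row 2 none else row
            (st.1 ++ [row], st.2)) :
    ∀ (l : List String) (acc : List (List (Option String))) (m : Option String),
      (l.foldl step (acc, m)).1 = acc ++ pvRunB pref m l := by
  subst hstep
  intro l
  induction l with
  | nil => intro acc m; simp [pvRunB]
  | cons x rest ih =>
    intro acc m
    by_cases hx : x = "COMPDAT" ∨ x = "COMPDATL"
    · have hxm : pvIsMarker x = true := (pvMarker_iff x).2 hx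
      simp only [List.foldl_cons, if_pos hx]
      rw [ih acc (some x)]
      simp [pvRunB, hxm]
    · have hxm : ¬ pvIsMarker x = true := fun h => hx ((pvMarker_iff x).1 h)
      cases m with
      | none =>
        simp only [List.foldl_cons, if_neg hx]
        rw [ih acc none]
        simp [pvRunB, hxm]
      | some mk =>
        simp only [List.foldl_cons, if_neg hx]
        rw [ih]
        simp [pvRunB, pvRow, hxm, List.append_assoc]

-- ===== VERDICT (by name: the statement is the Claim_ definition above) =====
theorem prepare_list_for_dataframe_spec : Claim_equal_prepare_list_for_dataframe := by
  intro l _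
  unfold Spec_prepare_list_for_dataframe
  unfold prepare_list_for_dataframe prepare_list_for_dataframe_alt
  have hstep : ∀ (acc : List (List (Option String))) (s : List String),
      (fun final_list string =>
        let fl1 :=
          if string.contains "DATES" ∧ string.length = 2 then
            final_list ++ [some ((PySem.List.pyGet? string 1).getD "") :: List.replicate 15 none]
          else final_list
        if ["COMPDAT", "COMPDATL"].any (fun element => string.contains element) then
          let fl2 :=
            if string.contains "DATES" then
              let indices := pvIndicesA string
              indices.foldl (fun fl ind =>
                pvWhileA string indices (some ((PySem.List.pyGet? string 1).getD "")) ind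
                  string.length 1 fl) fl1
            else fl1
          if ¬ string.contains "DATES" then
            let indices := pvIndicesA string
            indices.foldl (fun fl ind =>
              pvWhileA string indices none ind string.length 1 fl) fl2
          else fl2
        else fl1) acc s =
      (fun final_list string =>
        let hasDates := string.contains "DATES"
        let fl1 :=
          if hasDates ∧ string.length = 2 then
            final_list ++ [some ((PySem.List.pyGet? string 1).getD "") :: List.replicate 15 none]
          else final_list
        (string.foldl (fun (st : List (List (Option String)) × Option String) element =>
            if element = "COMPDAT" ∨ element = "COMPDATL" then (st.1, some element)
            else
              match st.2 with
              | none => st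
              | some m =>
                let row := (PySem.Str.split₀ element).map some
                let row := PySem.List.insert row 0
                  (if hasDates then some ((PySem.List.pyGet? string 1).getD "") else none)
                let row := if m = "COMPDAT" then PySem.List.insert row 2 none else row
                (st.1 ++ [row], st.2)) (fl1, none)).1) acc s := by
    intro acc s
    simp only []
    set pref : Option String :=
      (if s.contains "DATES" then some ((PySem.List.pyGet? s 1).getD "") else none) with hpref
    set fl1 : List (List (Option String)) :=
      (if s.contains "DATES" ∧ s.length = 2 then
        acc ++ [some ((PySem.List.pyGet? s 1).getD "") :: List.replicate 15 none]
      else acc) with hfl1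
    have hB : (s.foldl (fun (st : List (List (Option String)) × Option String) element =>
        if element = "COMPDAT" ∨ element = "COMPDATL" then (st.1, some element)
        else
          match st.2 with
          | none => st
          | some m =>
            let row := (PySem.Str.split₀ element).map some
            let row := PySem.List.insert row 0
              (if s.contains "DATES" then some ((PySem.List.pyGet? s 1).getD "") else none)
            let row := if m = "COMPDAT" then PySem.List.insert row 2 none else row
            (st.1 ++ [row], st.2)) (fl1, none)).1 = fl1 ++ pvRunB pref none s := by
      exact pvFoldB pref _ rfl s fl1 none
    rw [hB]
    by_cases hmk : (["COMPDAT", "COMPDATL"].any (fun element => s.contains element)) = true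
    · rw [if_pos hmk]
      by_cases hd : s.contains "DATES" = true
      · rw [if_pos hd, if_neg (by simpa using hd)]
        rw [pvFoldWhile s (pvIndicesA s) (some ((PySem.List.pyGet? s 1).getD "")) s.length
          (pvIndicesA s) fl1]
        rw [pvMain s (some ((PySem.List.pyGet? s 1).getD ""))]
        rw [hpref, if_pos hd]
      · rw [if_neg hd, if_pos (by simpa using hd)]
        rw [pvFoldWhile s (pvIndicesA s) none s.length (pvIndicesA s) fl1]
        rw [pvMain s none]
        rw [hpref, if_neg hd]
    · rw [if_neg hmk]
      simp only [List.any_cons, List.any_nil, Bool.or_eq_true, Bool.or_false] at hmk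
      push Not at hmk
      rw [pvRunB_no_marker pref s hmk.1 hmk.2, List.append_nil]
  have hfun : (fun (final_list : List (List (Option String))) (string : List String) =>
      let fl1 :=
        if string.contains "DATES" ∧ string.length = 2 then
          final_list ++ [some ((PySem.List.pyGet? string 1).getD "") :: List.replicate 15 none]
        else final_list
      if ["COMPDAT", "COMPDATL"].any (fun element => string.contains element) then
        let fl2 :=
          if string.contains "DATES" then
            let indices := pvIndicesA string
            indices.foldl (fun fl ind =>
              pvWhileA string indices (some ((PySem.List.pyGet? string 1).getD "")) ind
                string.length 1 fl) fl1
          else fl1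
        if ¬ string.contains "DATES" then
          let indices := pvIndicesA string
          indices.foldl (fun fl ind =>
            pvWhileA string indices none ind string.length 1 fl) fl2
        else fl2
      else fl1) = (fun final_list string =>
      let hasDates := string.contains "DATES"
      let fl1 :=
        if hasDates ∧ string.length = 2 then
          final_list ++ [some ((PySem.List.pyGet? string 1).getD "") :: List.replicate 15 none]
        else final_list
      (string.foldl (fun (st : List (List (Option String)) × Option String) element =>
          if element = "COMPDAT" ∨ element = "COMPDATL" then (st.1, some element)
          else
            match st.2 with
            | none => st
            | some m =>
              let row := (PySem.Str.split₀ element).map some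
              let row := PySem.List.insert row 0
                (if hasDates then some ((PySem.List.pyGet? string 1).getD "") else none)
              let row := if m = "COMPDAT" then PySem.List.insert row 2 none else row
              (st.1 ++ [row], st.2)) (fl1, none)).1) := by
    funext acc s
    exact hstep acc s
  rw [hfun]
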